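-- pv_equiv track=rewrite | github.com/Thanhtinh06/baitapbigo | Bai6/check_so_chan.py | check_so_chan
-- ===== SOURCE A (Python) =====
-- def check_so_chan(a, nrows, ncols):
--     index = 0
--     count_max = 0
--     for i in range(0, nrows):
--         count = 0
--         for j in range(ncols):
--             if a[i][j] % 2 == 0:
--                 count += 1
--         if count != 0 and count > count_max:
--             index = i
--             count_max = count
--
--     return index
-- ===== SOURCE B (Python) =====
-- def check_so_chan(a, nrows, ncols):
--     counts = [sum(1 for j in range(ncols) if a[i][j] % 2 == 0) for i in range(nrows)]
--     if not counts:
--         return 0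
--     return counts.index(max(counts))
-- ===== Notes on version B (the rewrite author's own statement) =====
-- stated objective: simpler
-- what changed: Replaces the fused double loop that threads a running (index, count_max) pair with a two-pass decomposition: first materialize the per-row even-count table, then return counts.index(max(counts)) (guarding the empty case), which matches A's first-strict-improvement tie-breaking because .index returns the first occurrence of the maximum.
import Mathlib
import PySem

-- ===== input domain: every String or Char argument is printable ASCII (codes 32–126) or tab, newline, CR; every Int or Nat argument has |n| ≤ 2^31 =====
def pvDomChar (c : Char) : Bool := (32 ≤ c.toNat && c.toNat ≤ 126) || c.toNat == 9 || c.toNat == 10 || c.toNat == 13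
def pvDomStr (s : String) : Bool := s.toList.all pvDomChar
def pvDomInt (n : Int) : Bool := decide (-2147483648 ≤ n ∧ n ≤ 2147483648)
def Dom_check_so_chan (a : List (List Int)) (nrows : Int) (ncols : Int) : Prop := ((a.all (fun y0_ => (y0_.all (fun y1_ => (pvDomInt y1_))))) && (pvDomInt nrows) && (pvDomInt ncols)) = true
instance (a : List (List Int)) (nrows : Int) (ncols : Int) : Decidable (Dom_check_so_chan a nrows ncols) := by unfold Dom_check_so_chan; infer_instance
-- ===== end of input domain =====

-- B replaces A's fused double loop (running (index, count_max) pair) with a two-pass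
-- decomposition: build the per-row even-count table, then argmax it via counts.index(max(counts)).

-- ===== PORT A =====
-- inner loop of A: count of even entries among a[i][0..ncols-1]
-- (pyGetD with a dummy default is exact under Pre_check_so_chan, which keeps all indices in range)
def evenCntA (a : List (List Int)) (ncols : Int) (i : Int) : Int :=
  (PySem.List.pyRange 0 ncols 1).foldl
    (fun count j =>
      if PySem.Int.mod (PySem.List.pyGetD (PySem.List.pyGetD a i []) j 0) 2 = 0 then count + 1
      else count) 0

def check_so_chan (a : List (List Int)) (nrows : Int) (ncols : Int) : Int :=
  ((PySem.List.pyRange 0 nrows 1).foldl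
    (fun (s : Int × Int) i =>
      let count := evenCntA a ncols i
      if count ≠ 0 ∧ count > s.2 then (i, count) else s)
    (0, 0)).1

-- ===== PORT B =====
-- inner comprehension of B: sum(1 for j in range(ncols) if a[i][j] % 2 == 0)
def evenCntB (a : List (List Int)) (ncols : Int) (i : Int) : Int :=
  (((PySem.List.pyRange 0 ncols 1).filter
      (fun j => PySem.Int.mod (PySem.List.pyGetD (PySem.List.pyGetD a i []) j 0) 2 = 0)).length : Int)

def check_so_chan_alt (a : List (List Int)) (nrows : Int) (ncols : Int) : Int :=
  let counts := (PySem.List.pyRange 0 nrows 1).map (evenCntB a ncols)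
  match PySem.List.max? counts (fun x => x) with
  | none => 0                -- counts empty: Python B returns 0
  | some m =>
    match PySem.List.index? counts m with
    | some k => (k : Int)
    | none => 0              -- unreachable: max(counts) ∈ counts, so .index never raises

-- ===== PRECONDITION & SPEC =====
-- Pre_: exactly the inputs where Python A's a[i][j] never raises IndexError: either the
-- inner loop is empty (ncols ≤ 0, nothing is ever indexed), or rows 0..nrows-1 exist and
-- each of them has at least ncols entries.
def Pre_check_so_chan (a : List (List Int)) (nrows : Int) (ncols : Int) : Prop :=
  ncols ≤ 0 ∨ (nrows ≤ (a.length : Int) ∧ ∀ row ∈ a.take nrows.toNat, ncols ≤ (row.length : Int))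
instance (a : List (List Int)) (nrows : Int) (ncols : Int) : Decidable (Pre_check_so_chan a nrows ncols) := by unfold Pre_check_so_chan; infer_instance

def pvWitness_check_so_chan : List (List Int) × Int × Int := ([[2, 3], [4, 6]], 2, 2)

def Spec_check_so_chan (a : List (List Int)) (nrows : Int) (ncols : Int) (out : Int) : Prop := out = check_so_chan_alt a nrows ncols
instance (a : List (List Int)) (nrows : Int) (ncols : Int) (out : Int) : Decidable (Spec_check_so_chan a nrows ncols out) := by unfold Spec_check_so_chan; infer_instance

-- ===== CLAIM (what is proved, stated in full; the proofs are below) =====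
def Claim_equal_check_so_chan : Prop := ∀ (a : List (List Int)) (nrows : Int) (ncols : Int), Dom_check_so_chan a nrows ncols → Pre_check_so_chan a nrows ncols → Spec_check_so_chan a nrows ncols (check_so_chan a nrows ncols)

-- ===== LEMMAS AND PROOFS =====

-- running maximum of c 0, …, c (n-1), floored at A's initial count_max = 0
def mrec (c : Int → Int) : Nat → Int
  | 0 => 0
  | n + 1 => max (mrec c n) (c n)

-- A's running best index
def irec (c : Int → Int) : Nat → Nat
  | 0 => 0
  | n + 1 => if c n > mrec c n then n else irec c n

theorem mrec_nonneg (c : Int → Int) (n : Nat) : 0 ≤ mrec c n := by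
  induction n with
  | zero => simp [mrec]
  | succ n ih => simp only [mrec, le_max_iff]; left; exact ih

theorem le_mrec (c : Int → Int) (i : Int) (n : Nat) (h0 : 0 ≤ i) (hn : i < (n : Int)) :
    c i ≤ mrec c n := by
  induction n with
  | zero => omega
  | succ n ih =>
    by_cases hi : i < (n : Int)
    · exact le_trans (ih hi) (by simp [mrec])
    · have : i = (n : Int) := by push_cast at hn ⊢; omega
      subst this; simp [mrec]

theorem counts_succ (c : Int → Int) (n : Nat) :
    (PySem.List.pyRange 0 ((n : Int) + 1) 1).map c
      = (PySem.List.pyRange 0 (n : Int) 1).map c ++ [c n] := by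
  rw [PySem.List.pyRange_one_succ_right (by positivity)]
  simp

theorem fold_eq_recs (c : Int → Int) (n : Nat) :
    (PySem.List.pyRange 0 (n : Int) 1).foldl
      (fun (s : Int × Int) i =>
        let count := c i
        if count ≠ 0 ∧ count > s.2 then (i, count) else s)
      (0, 0) = ((irec c n : Int), mrec c n) := by
  induction n with
  | zero => simp [irec, mrec]
  | succ n ih =>
    rw [show ((n + 1 : Nat) : Int) = (n : Int) + 1 by push_cast; ring,
        PySem.List.pyRange_one_succ_right (by positivity), List.foldl_append, ih]
    simp only [List.foldl_cons, List.foldl_nil]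
    by_cases h : c n > mrec c n
    · have hne : c n ≠ 0 := ne_of_gt (lt_of_le_of_lt (mrec_nonneg c n) h)
      simp [hne, h, irec, mrec, max_eq_right (le_of_lt h)]
    · have hle : c n ≤ mrec c n := not_lt.mp h
      have hcond : ¬ (c (n : Int) ≠ 0 ∧ c (n : Int) > mrec c n) := fun hx => h hx.2
      simp only [hcond, if_false]
      simp [irec, mrec, h, max_eq_left hle]

theorem mrec_mem (c : Int → Int) (hc : ∀ i, 0 ≤ c i) (n : Nat) (hn : 1 ≤ n) :
    mrec c n ∈ (PySem.List.pyRange 0 (n : Int) 1).map c := by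
  induction n with
  | zero => omega
  | succ n ih =>
    rw [show ((n + 1 : Nat) : Int) = (n : Int) + 1 by push_cast; ring, counts_succ]
    rcases Nat.eq_zero_or_pos n with h0 | hpos
    · subst h0; simp [mrec, max_eq_right (hc 0)]
    · by_cases h : mrec c n ≤ c n
      · simp [mrec, max_eq_right h]
      · rw [show mrec c (n + 1) = mrec c n by
            simp [mrec, max_eq_left (not_le.mp h).le]]
        exact List.mem_append_left _ (ih hpos)

theorem max?_eq_of_mem_ub (xs : List Int) (m : Int) (hm : m ∈ xs)
    (hub : ∀ y ∈ xs, y ≤ m) : PySem.List.max? xs (fun x => x) = some m := by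
  cases h : PySem.List.max? xs (fun x => x) with
  | none =>
    rw [PySem.List.max?_eq_none_iff] at h
    subst h; simp at hm
  | some m' =>
    have h1 : m' ∈ xs := PySem.List.max?_mem h
    have h2 : m ≤ m' := PySem.List.max?_isMax h m hm
    have h3 : m' ≤ m := hub m' h1
    exact congrArg some (le_antisymm h3 h2)

theorem mem_counts (c : Int → Int) (n : Nat) (y : Int)
    (hy : y ∈ (PySem.List.pyRange 0 (n : Int) 1).map c) : ∃ i : Int, 0 ≤ i ∧ i < (n : Int) ∧ y = c i := by
  rcases List.mem_map.1 hy with ⟨i, hi, rfl⟩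
  rw [PySem.List.mem_pyRange_one] at hi
  exact ⟨i, hi.1, hi.2, rfl⟩

theorem index?_counts (c : Int → Int) (hc : ∀ i, 0 ≤ c i) (n : Nat) (hn : 1 ≤ n) :
    PySem.List.index? ((PySem.List.pyRange 0 (n : Int) 1).map c) (mrec c n) = some (irec c n) := by
  induction n with
  | zero => omega
  | succ n ih =>
    rcases Nat.eq_zero_or_pos n with h0 | hpos
    · subst h0
      rw [show ((0 + 1 : Nat) : Int) = 0 + 1 by norm_num,
          PySem.List.pyRange_one_singleton 0]
      rw [show mrec c (0 + 1) = c 0 by simp [mrec, max_eq_right (hc 0)]]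
      rw [show irec c (0 + 1) = 0 by unfold irec; split <;> rfl]
      simp only [List.map_cons, List.map_nil]
      exact PySem.List.index?_cons_self (c 0) []
    · rw [show ((n + 1 : Nat) : Int) = (n : Int) + 1 by push_cast; ring, counts_succ]
      by_cases h : c n > mrec c n
      · have hnotin : c (n : Int) ∉ (PySem.List.pyRange 0 (n : Int) 1).map c := by
          intro hmem
          rcases mem_counts c n _ hmem with ⟨i, h0, hlt, heq⟩
          have := le_mrec c i n h0 hlt
          omega
        rw [show mrec c (n + 1) = c n by simp [mrec, max_eq_right (le_of_lt h)]]
        rw [PySem.List.index?_append_singleton_self _ _ hnotin]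
        simp [irec, h, PySem.List.length_pyRange_one]
      · rw [show mrec c (n + 1) = mrec c n by simp [mrec, max_eq_left (not_lt.mp h)]]
        rw [PySem.List.index?_append_of_mem _ (mrec_mem c hc n hpos)]
        rw [show irec c (n + 1) = irec c n by simp [irec, h]]
        exact ih hpos

-- the two inner loops compute the same per-row count
theorem foldl_count_eq_filter (l : List Int) (p : Int → Bool) :
    ∀ init : Int, l.foldl (fun count j => if p j then count + 1 else count) init
      = init + ((l.filter p).length : Int) := by
  induction l with
  | nil => intro init; simp
  | cons x t ih =>
    intro init
    by_cases h : p x = true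
    · simp [h, ih]; ring
    · simp [h, ih]

theorem cntB_eq_cntA (a : List (List Int)) (ncols : Int) (i : Int) :
    evenCntB a ncols i = evenCntA a ncols i := by
  unfold evenCntA evenCntB
  rw [show (fun count j => if PySem.Int.mod (PySem.List.pyGetD (PySem.List.pyGetD a i []) j 0) 2 = 0 then count + 1 else count)
        = (fun (count : Int) j => if (fun j => decide (PySem.Int.mod (PySem.List.pyGetD (PySem.List.pyGetD a i []) j 0) 2 = 0)) j = true then count + 1 else count) by
      funext count j; simp]
  rw [foldl_count_eq_filter _ _ 0]
  simp

theorem cntA_nonneg (a : List (List Int)) (ncols : Int) (i : Int) : 0 ≤ evenCntA a ncols i := by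
  rw [← cntB_eq_cntA]; unfold evenCntB; positivity

-- ===== VERDICT (by name: the statement is the Claim_ definition above) =====
theorem check_so_chan_spec : Claim_equal_check_so_chan := by
  intro a nrows ncols _ _
  unfold Spec_check_so_chan check_so_chan check_so_chan_alt
  dsimp only
  have hmap : (PySem.List.pyRange 0 nrows 1).map (evenCntB a ncols)
      = (PySem.List.pyRange 0 nrows 1).map (evenCntA a ncols) :=
    List.map_congr_left (fun i _ => cntB_eq_cntA a ncols i)
  by_cases hle : nrows ≤ 0
  · rw [PySem.List.pyRange_one_eq_nil hle]
    simp [PySem.List.max?]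
  · have hn : nrows = ((nrows.toNat : Nat) : Int) := by omega
    have hn1 : 1 ≤ nrows.toNat := by omega
    rw [hmap, hn, fold_eq_recs (evenCntA a ncols) nrows.toNat]
    rw [max?_eq_of_mem_ub _ (mrec (evenCntA a ncols) nrows.toNat)
          (mrec_mem _ (cntA_nonneg a ncols) _ hn1)
          (fun y hy => by
            rcases mem_counts _ _ _ hy with ⟨i, h0, hlt, rfl⟩
            exact le_mrec _ i _ h0 hlt)]
    dsimp only
    rw [index?_counts _ (cntA_nonneg a ncols) _ hn1]
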